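-- pv_equiv track=rewrite | github.com/paiml/depyler | examples/hard_pattern_recognition.py | longest_plateau
-- ===== SOURCE A (Python) =====
-- def longest_plateau(arr: list[int]) -> int:
--     """Find length of longest plateau (consecutive equal elements)."""
--     if len(arr) == 0:
--         return 0
--     best: int = 1
--     current: int = 1
--     i: int = 1
--     while i < len(arr):
--         if arr[i] == arr[i - 1]:
--             current = current + 1
--             if current > best:
--                 best = current
--         else:
--             current = 1
--         i = i + 1
--     return best
-- ===== SOURCE B (Python) =====
-- def longest_plateau(arr: list[int]) -> int:
--     """Find length of longest plateau (consecutive equal elements).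
--
--     Group-then-aggregate: first build the list of lengths of the maximal
--     runs of equal consecutive elements, then take the maximum run length.
--     """
--     runs = []
--     prev = None
--     for x in arr:
--         if runs and x == prev:
--             runs[-1] = runs[-1] + 1
--         else:
--             runs.append(1)
--         prev = x
--     best = 0
--     for r in runs:
--         best = max(best, r)
--     return best
-- ===== Notes on version B (the rewrite author's own statement) =====
-- stated objective: alternative
-- what changed: Replaces A's single scan with a running best/current counter by a group-then-aggregate shape: split the list into maximal runs of equal consecutive elements, collect the run lengths, then fold max over them (0 for the empty list).
import Mathlib
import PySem

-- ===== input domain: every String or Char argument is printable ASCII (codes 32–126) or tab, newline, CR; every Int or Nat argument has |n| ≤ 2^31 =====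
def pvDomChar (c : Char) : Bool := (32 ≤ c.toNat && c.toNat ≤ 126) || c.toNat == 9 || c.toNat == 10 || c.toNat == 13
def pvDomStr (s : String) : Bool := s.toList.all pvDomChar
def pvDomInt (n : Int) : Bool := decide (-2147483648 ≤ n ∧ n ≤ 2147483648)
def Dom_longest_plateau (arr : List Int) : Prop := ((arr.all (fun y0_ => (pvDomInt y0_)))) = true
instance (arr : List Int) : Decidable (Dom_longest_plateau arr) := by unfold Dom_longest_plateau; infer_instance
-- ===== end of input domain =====

-- B replaces A's running best/current scan by a group-then-aggregate shape: build the
-- list of maximal-run lengths first, then fold max over it; alternative decomposition, same cost.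


-- ===== PORT A =====
-- body of A's 'while i < len(arr)' loop; state s = (best, current), arr[i] via pyGet? (i in range)
def stepA (arr : List Int) (s : Int × Int) (i : Int) : Int × Int :=
  if (PySem.List.pyGet? arr i).getD 0 = (PySem.List.pyGet? arr (i - 1)).getD 0 then
    let current' := s.2 + 1
    (if current' > s.1 then current' else s.1, current')
  else (s.1, 1)

-- 'i = 1; while i < len(arr): … i = i + 1' = fold of the body over range(1, len(arr))
def longest_plateau (arr : List Int) : Int :=
  if (arr.length : Int) = 0 then 0
  else ((PySem.List.pyRange 1 arr.length 1).foldl (stepA arr) (1, 1)).1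

-- ===== PORT B =====
-- 'runs[-1] = runs[-1] + 1' (runs is nonempty when executed)
def incLast : List Int → List Int
  | [] => []
  | [r] => [r + 1]
  | r :: rs => r :: incLast rs

-- body of Source B's first loop; state s = (runs, prev); 'x == prev' with prev possibly None
def stepB (s : List Int × Option Int) (x : Int) : List Int × Option Int :=
  if s.1 ≠ [] ∧ some x = s.2 then (incLast s.1, some x)
  else (s.1 ++ [1], some x)

-- first loop builds the run lengths, second loop folds max over them from best = 0
def longest_plateau_alt (arr : List Int) : Int :=
  (arr.foldl stepB (([] : List Int), (none : Option Int))).1.foldl max 0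

-- ===== PRECONDITION & SPEC =====
def Spec_longest_plateau (arr : List Int) (out : Int) : Prop := out = longest_plateau_alt arr
instance (arr : List Int) (out : Int) : Decidable (Spec_longest_plateau arr out) := by unfold Spec_longest_plateau; infer_instance

-- ===== CLAIM (what is proved, stated in full; the proofs are below) =====
def Claim_equal_longest_plateau : Prop := ∀ (arr : List Int), Dom_longest_plateau arr → Spec_longest_plateau arr (longest_plateau arr)

-- ===== LEMMAS AND PROOFS =====

-- A's loop, re-expressed structurally: previous element, best, current, remaining list
def auxA (prev best cur : Int) : List Int → Int
  | [] => best
  | x :: xs =>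
      if x = prev then auxA x (if cur + 1 > best then cur + 1 else best) (cur + 1) xs
      else auxA x best 1 xs

-- length of the longest run, seen from the middle of a run (cur elements already counted)
def g (prev cur : Int) : List Int → Int
  | [] => cur
  | x :: xs => if x = prev then g x (cur + 1) xs else max cur (g x 1 xs)

-- run lengths of l, with a run of prev of length k already open
def runsFrom (prev k : Int) : List Int → List Int
  | [] => [k]
  | x :: xs => if x = prev then runsFrom x (k + 1) xs else k :: runsFrom x 1 xs

theorem pyGet?_getD_of_lt (arr : List Int) (i : Int) (h0 : 0 ≤ i) (h : i < (arr.length : Int))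
    (hh : i.toNat < arr.length) :
    (PySem.List.pyGet? arr i).getD 0 = arr[i.toNat] := by
  simp [PySem.List.pyGet?, PySem.List.pyIdx?, h0, h]

theorem foldA_eq_auxA (arr : List Int) (n : Nat) :
    ∀ (i best cur : Int), 1 ≤ i → n = ((arr.length : Int) - i).toNat →
    ((PySem.List.pyRange i arr.length 1).foldl (stepA arr) (best, cur)).1
      = auxA ((PySem.List.pyGet? arr (i - 1)).getD 0) best cur (arr.drop i.toNat) := by
  induction n with
  | zero =>
      intro i best cur h1 hn
      rw [PySem.List.pyRange_one_eq_nil (by omega), List.drop_eq_nil_of_le (by omega)]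
      rfl
  | succ m ih =>
      intro i best cur h1 hn
      have hlt : i < (arr.length : Int) := by omega
      have hi : i.toNat < arr.length := by omega
      rw [PySem.List.pyRange_one_cons hlt, List.foldl_cons, List.drop_eq_getElem_cons hi]
      have hsa : stepA arr (best, cur) i =
          if arr[i.toNat] = (PySem.List.pyGet? arr (i - 1)).getD 0 then
            (if cur + 1 > best then cur + 1 else best, cur + 1)
          else (best, 1) := by
        rw [stepA, pyGet?_getD_of_lt arr i (by omega) hlt hi]
      rw [hsa]
      have hget1 : ((PySem.List.pyGet? arr (i + 1 - 1)).getD 0) = arr[i.toNat] := by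
        rw [pyGet?_getD_of_lt arr (i + 1 - 1) (by omega) (by omega) (by omega)]
        congr 1
        omega
      have hdrop : arr.drop (i + 1).toNat = arr.drop (i.toNat + 1) := by
        congr 1
        omega
      by_cases hc : arr[i.toNat] = (PySem.List.pyGet? arr (i - 1)).getD 0
      · rw [if_pos hc]
        rw [ih (i + 1) _ _ (by omega) (by omega), hget1, hdrop]
        simp only [auxA, if_pos hc]
      · rw [if_neg hc]
        rw [ih (i + 1) _ _ (by omega) (by omega), hget1, hdrop]
        simp only [auxA, if_neg hc]

theorem g_ge (l : List Int) (prev cur : Int) : cur ≤ g prev cur l := by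
  induction l generalizing prev cur with
  | nil => simp [g]
  | cons x xs ih =>
      simp only [g]
      split
      · exact le_trans (by omega) (ih x (cur + 1))
      · exact le_max_left _ _

theorem auxA_eq_g (l : List Int) (prev best cur : Int) (h1 : 1 ≤ cur) (h2 : cur ≤ best) :
    auxA prev best cur l = max best (g prev cur l) := by
  induction l generalizing prev best cur with
  | nil => simp only [auxA, g]; omega
  | cons x xs ih =>
      simp only [auxA, g]
      by_cases hx : x = prev
      · simp only [if_pos hx]
        rw [ih x _ (cur + 1) (by omega) (by split <;> omega)]
        have := g_ge xs x (cur + 1)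
        split <;> omega
      · simp only [if_neg hx]
        rw [ih x best 1 (by omega) (by omega)]
        have := g_ge xs x 1
        omega

theorem incLast_append (rs : List Int) (k : Int) :
    incLast (rs ++ [k]) = rs ++ [k + 1] := by
  induction rs with
  | nil => rfl
  | cons r rs ih =>
      cases rs with
      | nil => rfl
      | cons r' rs' => simpa [incLast] using ih

theorem foldB_runs (xs : List Int) :
    ∀ (rs : List Int) (p k : Int),
    (xs.foldl stepB (rs ++ [k], some p)).1 = rs ++ runsFrom p k xs := by
  induction xs with
  | nil => intro rs p k; simp [runsFrom]
  | cons x xs ih =>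
      intro rs p k
      simp only [List.foldl_cons, runsFrom]
      by_cases hx : x = p
      · have hs : stepB (rs ++ [k], some p) x = (rs ++ [k + 1], some x) := by
          rw [stepB]
          rw [if_pos ⟨by simp, by rw [hx]⟩, incLast_append]
        rw [hs, ih rs x (k + 1), if_pos hx]
      · have hs : stepB (rs ++ [k], some p) x = ((rs ++ [k]) ++ [1], some x) := by
          rw [stepB]
          rw [if_neg (by simp [hx])]
        rw [hs, ih (rs ++ [k]) x 1, if_neg hx, List.append_assoc]
        rfl

theorem foldl_max_max (l : List Int) (a b : Int) :
    l.foldl max (max a b) = max a (l.foldl max b) := by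
  induction l generalizing b with
  | nil => simp
  | cons x xs ih => simp only [List.foldl, max_assoc, ih]

theorem g_eq_runsFrom (l : List Int) (prev k : Int) (h : 0 ≤ k) :
    g prev k l = (runsFrom prev k l).foldl max 0 := by
  induction l generalizing prev k with
  | nil => simp only [g, runsFrom, List.foldl]; omega
  | cons x xs ih =>
      simp only [g, runsFrom]
      by_cases hx : x = prev
      · simp only [if_pos hx]
        exact ih x (k + 1) (by omega)
      · simp only [if_neg hx, List.foldl_cons]
        rw [ih x 1 (by omega)]
        rw [show max (0 : Int) k = max k 0 from max_comm _ _, foldl_max_max]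

-- ===== VERDICT (by name: the statement is the Claim_ definition above) =====
theorem longest_plateau_spec : Claim_equal_longest_plateau := by
  intro arr _
  unfold Spec_longest_plateau longest_plateau longest_plateau_alt
  cases arr with
  | nil => simp
  | cons x xs =>
      simp only [List.length_cons]
      rw [if_neg (by push_cast; omega)]
      have hA := foldA_eq_auxA (x :: xs) (((x :: xs).length : Int) - 1).toNat 1 1 1
        (by omega) (by simp)
      simp only [List.length_cons] at hA
      rw [hA]
      have hget : ((PySem.List.pyGet? (x :: xs) (1 - 1)).getD 0) = x := by
        simp [PySem.List.pyGet?, PySem.List.pyIdx?]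
      rw [hget]
      simp only [Int.toNat_one, List.drop_succ_cons, List.drop_zero]
      have hB : ((x :: xs).foldl stepB ([], none)).1 = runsFrom x 1 xs := by
        have hs0 : stepB ([], none) x = ([] ++ [1], some x) := by
          rw [stepB, if_neg (by simp)]
        rw [List.foldl_cons, hs0, foldB_runs xs [] x 1]
        simp
      rw [hB]
      rw [auxA_eq_g xs x 1 1 le_rfl le_rfl, g_eq_runsFrom xs x 1 (by omega)]
      have h2 : (1 : Int) ≤ (runsFrom x 1 xs).foldl max 0 := by
        rw [← g_eq_runsFrom xs x 1 (by omega)]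
        exact g_ge xs x 1
      omega
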